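-- pv_equiv track=rewrite | github.com/Creamy-cake/deloitte_exam | main.py | istitle
-- ===== SOURCE A (Python) =====
-- titlemark = ['%d)'%i for i in range(10)]
--
-- def istitle(txt):
--     j = 0
--     for mark in titlemark:
--         if mark in txt:
--             j += 1
--     if j == 1:
--         return True
--     else:
--         return False
-- ===== SOURCE B (Python) =====
-- def istitle(txt):
--     seen = {a for a, b in zip(txt, txt[1:]) if a in '0123456789' and b == ')'}
--     return len(seen) == 1
-- ===== Notes on version B (the rewrite author's own statement) =====
-- stated objective: simpler
-- what changed: Replaces ten independent substring scans ('d)' in txt for each digit) by a single pass over adjacent character pairs collecting the distinct digit marks found, then tests whether exactly one was seen.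
import Mathlib
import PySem

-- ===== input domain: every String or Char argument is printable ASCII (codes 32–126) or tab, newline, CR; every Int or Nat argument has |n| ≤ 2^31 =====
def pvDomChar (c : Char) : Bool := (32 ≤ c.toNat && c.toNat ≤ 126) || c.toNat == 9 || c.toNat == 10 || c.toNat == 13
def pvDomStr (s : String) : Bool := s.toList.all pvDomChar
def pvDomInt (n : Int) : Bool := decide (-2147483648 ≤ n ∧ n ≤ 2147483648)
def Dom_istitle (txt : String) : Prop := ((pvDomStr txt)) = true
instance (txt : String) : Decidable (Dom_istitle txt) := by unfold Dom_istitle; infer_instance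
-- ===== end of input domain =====

-- B replaces A's ten independent substring scans by one pass over adjacent character pairs (simpler).

-- ===== PORT A =====
-- '%d)' % i is ported exactly as the char list of str(i) with ')' appended
def pvTitlemark : List String :=
  (PySem.List.pyRange 0 10 1).map (fun i => String.ofList (PySem.Int.toChars i ++ [')']))

def istitle (txt : String) : Bool :=
  let j : Int := pvTitlemark.foldl (fun j mark => if PySem.Str.isIn mark txt then j + 1 else j) 0
  if j == 1 then true else false

-- ===== PORT B =====
def istitle_alt (txt : String) : Bool :=
  let pairs := txt.toList.zip (PySem.List.slice txt.toList (some 1) none)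
  let seen : PySem.Set Char :=
    PySem.Set.ofList
      ((pairs.filter (fun p => "0123456789".toList.contains p.1 && p.2 == ')')).map Prod.fst)
  PySem.Set.len seen == 1

-- ===== PRECONDITION & SPEC =====
def Spec_istitle (txt : String) (out : Bool) : Prop := out = istitle_alt txt
instance (txt : String) (out : Bool) : Decidable (Spec_istitle txt out) := by unfold Spec_istitle; infer_instance

-- ===== CLAIM (what is proved, stated in full; the proofs are below) =====
def Claim_equal_istitle : Prop := ∀ (txt : String), Dom_istitle txt → Spec_istitle txt (istitle txt)

-- ===== LEMMAS AND PROOFS =====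
-- a two-character substring occurs iff it is one of the adjacent pairs
theorem pv_pair_infix (a b : Char) (l : List Char) :
    [a, b] <:+: l ↔ (a, b) ∈ l.zip (l.drop 1) := by
  induction l with
  | nil => simp
  | cons x t ih =>
    cases t with
    | nil =>
      simp only [List.infix_cons_iff, List.drop_nil, List.zip_nil_right, List.not_mem_nil,
        iff_false, List.drop_succ_cons]
      rintro (⟨w, hw⟩ | ⟨w, hw⟩) <;> simp_all
    | cons y t' =>
      rw [List.infix_cons_iff, ih]
      have hpre : [a, b] <+: x :: y :: t' ↔ (a = x ∧ b = y) := by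
        constructor
        · rintro ⟨w, hw⟩
          injection hw with h1 hw; injection hw with h2 _
          exact ⟨h1, h2⟩
        · rintro ⟨rfl, rfl⟩; exact ⟨t', rfl⟩
      rw [hpre]
      simp [List.zip_cons_cons]

def pvDigits : List Char := ['0','1','2','3','4','5','6','7','8','9']

theorem pv_main (txt : String) : istitle txt = istitle_alt txt := by
  unfold istitle istitle_alt
  have hm : pvTitlemark = pvDigits.map (fun c => String.ofList [c, ')']) := by decide
  rw [hm, List.foldl_map, PySem.List.slice_from _ (by norm_num)]
  have hfold : pvDigits.foldl
      (fun j c => if PySem.Str.isIn (String.ofList [c, ')']) txt then j + 1 else j) (0 : Int)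
      = (0 : Int) + (pvDigits.countP (fun c => PySem.Str.isIn (String.ofList [c, ')']) txt)) :=
    PySem.List.foldl_count_if _ _ _
  rw [hfold, zero_add]
  -- the two Nodup lists have the same members, hence the same length
  set l := txt.toList with hl
  set firsts := ((l.zip (l.drop (1 : Int).toNat)).filter
      (fun p => "0123456789".toList.contains p.1 && p.2 == ')')).map Prod.fst with hf
  have hperm : (pvDigits.filter (fun c => PySem.Str.isIn (String.ofList [c, ')']) txt)).Perm
      (PySem.Set.ofList firsts) := by
    rw [List.perm_ext_iff_of_nodup (List.Nodup.filter _ (by decide)) (PySem.Set.nodup_ofList _)]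
    intro c
    rw [List.mem_filter, PySem.Set.mem_ofList, hf, List.mem_map]
    constructor
    · rintro ⟨hc, hin⟩
      rw [PySem.Str.isIn_iff_infix] at hin
      have hin' : [c, ')'] <:+: l := by simpa using hin
      have hz : (c, ')') ∈ l.zip (l.drop 1) := (pv_pair_infix c ')' l).mp hin'
      have hsd : ("0123456789".toList : List Char) = pvDigits := by decide
      refine ⟨(c, ')'), List.mem_filter.mpr ⟨by simpa using hz, ?_⟩, rfl⟩
      simp [hsd, hc]
    · rintro ⟨p, hp, rfl⟩
      rw [List.mem_filter] at hp
      obtain ⟨hmem, hpred⟩ := hp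
      simp only [Bool.and_eq_true, List.contains_eq_mem, decide_eq_true_eq, beq_iff_eq] at hpred
      obtain ⟨hd, hb⟩ := hpred
      have hsd : ("0123456789".toList : List Char) = pvDigits := by decide
      refine ⟨hsd ▸ hd, ?_⟩
      rw [PySem.Str.isIn_iff_infix]
      have hz : (p.1, ')') ∈ l.zip (l.drop 1) := by
        have h2 := hmem
        rw [show p = (p.1, p.2) from rfl, hb] at h2
        simpa using h2
      simpa using (pv_pair_infix p.1 ')' l).mpr hz
  have hlen : (pvDigits.countP (fun c => PySem.Str.isIn (String.ofList [c, ')']) txt))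
      = (PySem.Set.ofList firsts).length := by
    rw [← hperm.length_eq, ← List.countP_eq_length_filter]
  simp only [PySem.Set.len, hlen]
  cases h : ((PySem.Set.ofList firsts).length : Int) == 1 <;> rfl

-- ===== VERDICT (by name: the statement is the Claim_ definition above) =====
theorem istitle_spec : Claim_equal_istitle := by
  intro txt _
  unfold Spec_istitle
  exact pv_main txt
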